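-- pv_equiv track=rewrite | github.com/newliar/Experiment | test/src/2020.8.28.py | get_public_node
-- ===== SOURCE A (Python) =====
-- def get_public_node(way_info):
--     all_node = []
--     for way in way_info:
--         for node in way[2:len(way)]:
--             all_node.append(node)
--     _public_node = []
--     for node in all_node:
--         public_node_ = [node]
--         for way in way_info:
--             for single_node in way[2:len(way)]:
--                 if node == single_node:
--                     public_node_.append(way[0])
--                     public_node_.append(way[1])
--         _public_node.append(public_node_)
--     public_node = []
--     for ele in _public_node:
--         if len(ele)>3:
--             public_node.append(ele)
--     return public_node
-- ===== SOURCE B (Python) =====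
-- def get_public_node(way_info):
--     # One pass builds node -> flat list of [way[0], way[1]] endpoint pairs,
--     # then one pass over the node occurrences emits the shared ones.
--     pairs = {}
--     for way in way_info:
--         for node in way[2:]:
--             pairs.setdefault(node, []).extend((way[0], way[1]))
--     result = []
--     for way in way_info:
--         for node in way[2:]:
--             ps = pairs[node]
--             if len(ps) > 2:
--                 result.append([node] + ps)
--     return result
-- ===== Notes on version B (the rewrite author's own statement) =====
-- stated objective: faster
-- what changed: B replaces A's rescan of all ways for every node occurrence with a dict node->endpoint-pair list built in one pass plus a lookup per occurrence; intended as faster (scan work O(N+M) instead of O(N*M)) and measured ~2.0x at n=4096, but on dense inputs the output itself is quadratic in size, so both programs fail at the largest timing size.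
import Mathlib
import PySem

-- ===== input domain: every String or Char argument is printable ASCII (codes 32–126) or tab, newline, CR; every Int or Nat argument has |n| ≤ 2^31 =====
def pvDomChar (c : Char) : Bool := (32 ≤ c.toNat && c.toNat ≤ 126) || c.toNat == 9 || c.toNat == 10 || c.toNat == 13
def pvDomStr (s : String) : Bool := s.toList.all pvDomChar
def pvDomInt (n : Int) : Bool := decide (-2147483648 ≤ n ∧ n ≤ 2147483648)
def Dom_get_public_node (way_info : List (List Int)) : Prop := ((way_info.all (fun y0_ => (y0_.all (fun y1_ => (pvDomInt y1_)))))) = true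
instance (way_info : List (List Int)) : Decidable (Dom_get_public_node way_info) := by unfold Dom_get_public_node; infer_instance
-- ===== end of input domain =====

-- B builds a dict node -> endpoint-pair list in one pass, then looks it up per node
-- occurrence, instead of A's rescan of all ways for every node occurrence (intended as
-- faster; measured ~2x at n=4096, both fail at n=16384 where the output is quadratic).


-- ===== PORT A =====
-- 'way[2:]' is the tail past the first two elements; 'way[0]'/'way[1]' are only
-- read when 'way[2:]' is nonempty, i.e. way = a :: b :: rest — the match makes
-- both exact (a shorter way contributes an empty inner loop, as in Python).
def get_public_node (way_info : List (List Int)) : List (List Int) :=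
  let all_node := way_info.foldl (fun acc way =>
    match way with
    | _ :: _ :: rest => rest.foldl (fun a n => a ++ [n]) acc
    | _ => acc) []
  let _public_node := all_node.foldl (fun acc node =>
    let public_node_ := way_info.foldl (fun p way =>
      match way with
      | a :: b :: rest => rest.foldl (fun p2 single_node =>
          if node == single_node then p2 ++ [a] ++ [b] else p2) p
      | _ => p) [node]
    acc ++ [public_node_]) []
  _public_node.foldl (fun acc ele => if ele.length > 3 then acc ++ [ele] else acc) []

-- ===== PORT B =====
-- pairs.setdefault(node, []).extend((way[0], way[1]))  ==  pairs[node] = pairs.get(node, []) + [way[0], way[1]];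
-- way[2:] → PySem.List.slice; way[0]/way[1] → PySem.List.pyGetD, exact here because they are
-- only evaluated when way[2:] is nonempty, i.e. both indices are in range.
def get_public_node_alt (way_info : List (List Int)) : List (List Int) :=
  let pairs := way_info.foldl (fun d way =>
    (PySem.List.slice way (some 2) none).foldl (fun d node =>
      d.modify node [] (· ++ [PySem.List.pyGetD way 0 0, PySem.List.pyGetD way 1 0])) d)
    (PySem.Dict.empty : PySem.Dict Int (List Int))
  way_info.foldl (fun result way =>
    (PySem.List.slice way (some 2) none).foldl (fun result node =>
      let ps := pairs.getD node []
      if ps.length > 2 then result ++ [node :: ps] else result) result) []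

-- ===== PRECONDITION & SPEC =====
def Spec_get_public_node (way_info : List (List Int)) (out : List (List Int)) : Prop := out = get_public_node_alt way_info
instance (way_info : List (List Int)) (out : List (List Int)) : Decidable (Spec_get_public_node way_info out) := by unfold Spec_get_public_node; infer_instance

-- ===== CLAIM (what is proved, stated in full; the proofs are below) =====
def Claim_equal_get_public_node : Prop := ∀ (way_info : List (List Int)), Dom_get_public_node way_info → Spec_get_public_node way_info (get_public_node way_info)

-- ===== LEMMAS AND PROOFS =====

-- the multiset of endpoint pairs A's inner double loop collects for a node n
def pvOcc (way_info : List (List Int)) (n : Int) : List Int :=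
  way_info.flatMap (fun way =>
    match way with
    | a :: b :: rest => rest.flatMap (fun s => if n == s then [a, b] else [])
    | _ => [])

-- the tail 'way[2:]'
def pvTail2 (way : List Int) : List Int :=
  match way with
  | _ :: _ :: rest => rest
  | _ => []

theorem pv_foldl_app {α β : Type} (f : α → List β) (l : List α) (init : List β) :
    l.foldl (fun acc x => acc ++ f x) init = init ++ l.flatMap f := by
  induction l generalizing init with
  | nil => simp
  | cons x l ih => simp [List.foldl, ih, List.append_assoc]

theorem pv_inner_collect (n a b : Int) (rest : List Int) (p : List Int) :
    rest.foldl (fun p2 s => if n == s then p2 ++ [a] ++ [b] else p2) p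
      = p ++ rest.flatMap (fun s => if n == s then [a, b] else []) := by
  induction rest generalizing p with
  | nil => simp
  | cons s rest ih =>
      rw [List.foldl_cons, List.flatMap_cons]
      by_cases h : n = s
      · rw [if_pos (by simp [h]), ih]
        simp [h, List.append_assoc]
      · rw [if_neg (by simp [h]), ih]
        simp [h]

theorem pv_collect (way_info : List (List Int)) (n : Int) (p : List Int) :
    way_info.foldl (fun p way =>
      match way with
      | a :: b :: rest => rest.foldl (fun p2 s =>
          if n == s then p2 ++ [a] ++ [b] else p2) p
      | _ => p) p
      = p ++ pvOcc way_info n := by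
  induction way_info generalizing p with
  | nil => simp [pvOcc]
  | cons w ws ih =>
      match w with
      | [] => simpa [pvOcc, List.flatMap_cons] using ih p
      | [x] => simpa [pvOcc, List.flatMap_cons] using ih p
      | a :: b :: rest =>
          simp only [List.foldl_cons]
          rw [pv_inner_collect, ih]
          simp [pvOcc, List.append_assoc]

theorem pv_dict_inner (rest : List Int) (a b n : Int) (d : PySem.Dict Int (List Int)) :
    (rest.foldl (fun d node => d.modify node [] (· ++ [a, b])) d).getD n []
      = d.getD n [] ++ rest.flatMap (fun s => if n == s then [a, b] else []) := by
  induction rest generalizing d with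
  | nil => simp
  | cons s rest ih =>
      simp only [List.foldl, ih, List.flatMap_cons]
      rw [PySem.Dict.getD_modify]
      by_cases h : n = s <;> simp [h, List.append_assoc]

theorem pv_slice2 (way : List Int) : PySem.List.slice way (some 2) none = pvTail2 way := by
  have h := PySem.List.slice_from_natCast (xs := way) (a := 2)
  norm_num at h
  rw [h]
  rcases way with _ | ⟨a, _ | ⟨b, rest⟩⟩ <;> simp [pvTail2]

theorem pv_get0 (a b : Int) (rest : List Int) : PySem.List.pyGetD (a :: b :: rest) 0 0 = a := by
  simp [PySem.List.pyGetD, PySem.List.pyIdx?]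

theorem pv_get1 (a b : Int) (rest : List Int) : PySem.List.pyGetD (a :: b :: rest) 1 0 = b := by
  simp [PySem.List.pyGetD, PySem.List.pyIdx?]

theorem pv_dict_build (way_info : List (List Int)) (n : Int) (d : PySem.Dict Int (List Int)) :
    (way_info.foldl (fun d way =>
      (PySem.List.slice way (some 2) none).foldl (fun d node =>
        d.modify node [] (· ++ [PySem.List.pyGetD way 0 0, PySem.List.pyGetD way 1 0])) d) d).getD n []
      = d.getD n [] ++ pvOcc way_info n := by
  induction way_info generalizing d with
  | nil => simp [pvOcc]
  | cons w ws ih =>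
      rw [List.foldl_cons, pv_slice2]
      match w with
      | [] => simpa [pvOcc, List.flatMap_cons, pvTail2] using ih d
      | [x] => simpa [pvOcc, List.flatMap_cons, pvTail2] using ih d
      | a :: b :: rest =>
          rw [show pvTail2 (a :: b :: rest) = rest from rfl, pv_get0, pv_get1, ih,
            pv_dict_inner]
          simp [pvOcc, List.append_assoc]

-- A's all_node accumulator is init ++ the flattened tails
theorem pv_all_node (way_info : List (List Int)) (init : List Int) :
    way_info.foldl (fun acc way =>
      match way with
      | _ :: _ :: rest => rest.foldl (fun a n => a ++ [n]) acc
      | _ => acc) init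
      = init ++ way_info.flatMap pvTail2 := by
  induction way_info generalizing init with
  | nil => simp
  | cons w ws ih =>
      match w with
      | [] => simpa [pvTail2, List.flatMap_cons] using ih init
      | [x] => simpa [pvTail2, List.flatMap_cons] using ih init
      | a :: b :: rest =>
          simp only [List.foldl_cons]
          rw [show (rest.foldl (fun a n => a ++ [n]) init) = init ++ rest from by
            simpa using pv_foldl_app (fun n => [n]) rest init, ih]
          simp [pvTail2, List.append_assoc]

-- B's output loop, rewritten as a single fold over the flattened node occurrences
theorem pv_b_flat (way_info : List (List Int)) (step : List (List Int) → Int → List (List Int))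
    (init : List (List Int)) :
    way_info.foldl (fun result way =>
      (PySem.List.slice way (some 2) none).foldl step result) init
      = (way_info.flatMap pvTail2).foldl step init := by
  induction way_info generalizing init with
  | nil => simp
  | cons w ws ih =>
      rw [List.foldl_cons, pv_slice2, List.flatMap_cons, List.foldl_append, ih]

-- filtering fold at the end of A
theorem pv_filter_fold (l : List (List Int)) (init : List (List Int)) :
    l.foldl (fun acc ele => if ele.length > 3 then acc ++ [ele] else acc) init
      = init ++ l.filter (fun ele => ele.length > 3) := by
  induction l generalizing init with
  | nil => simp
  | cons e l ih =>
      by_cases h : e.length > 3 <;> simp [List.foldl, h, ih, List.append_assoc]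

theorem pv_foldl_append_ite {a b : Type} (p : a -> Prop) [DecidablePred p]
    (f : a -> List b) (l : List a) (init : List (List b)) :
    l.foldl (fun r x => if p x then r ++ [f x] else r) init
      = init ++ (l.filter (fun x => decide (p x))).map f := by
  induction l generalizing init with
  | nil => simp
  | cons x l ih =>
      by_cases h : p x
      · simp [List.foldl, h, ih, List.append_assoc]
      · simp [List.foldl, h, ih]

theorem pv_map_fold {a b : Type} (f : a -> List b) (l : List a) (init : List (List b)) :
    l.foldl (fun acc n => acc ++ [f n]) init = init ++ l.map (fun n => f n) := by
  induction l generalizing init with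
  | nil => simp
  | cons n l ih => simp [List.foldl, ih, List.append_assoc]

theorem pv_A_eq (wi : List (List Int)) :
    get_public_node wi
      = ((wi.flatMap pvTail2).map (fun n => n :: pvOcc wi n)).filter (fun e => e.length > 3) := by
  unfold get_public_node
  simp only [pv_all_node, List.nil_append, pv_collect, List.singleton_append,
    pv_map_fold, pv_filter_fold]

theorem pv_B_eq (wi : List (List Int)) :
    get_public_node_alt wi
      = (wi.flatMap pvTail2).foldl (fun r n =>
          if (pvOcc wi n).length > 2 then r ++ [n :: pvOcc wi n] else r) [] := by
  unfold get_public_node_alt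
  rw [pv_b_flat]
  simp only [pv_dict_build, PySem.Dict.getD_empty, List.nil_append]

-- ===== VERDICT (by name: the statement is the Claim_ definition above) =====
theorem get_public_node_spec : Claim_equal_get_public_node := by
  intro way_info _
  unfold Spec_get_public_node
  rw [pv_A_eq, pv_B_eq,
    pv_foldl_append_ite (fun n => (pvOcc way_info n).length > 2)
      (fun n => n :: pvOcc way_info n), List.nil_append, List.filter_map]
  congr 1
  apply List.filter_congr
  intro n _
  simp only [Function.comp, List.length_cons]
  simp only [gt_iff_lt, decide_eq_decide]
  omega
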